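-- pv_equiv track=rewrite | github.com/MinJiChoi0610/IJNM2022 | similarAbilien_scripts_5.new_algorithm_sfclength5_220316/predict_resource_RNN_new_algorithm.py | sla_violation_threshold
-- ===== SOURCE A (Python) =====
-- def sla_violation_threshold(server_needed):
--     under_provision=0
--     over_provision=0
--     for i in range(len(server_needed)-2):
--         if server_needed[i] == server_needed[i+2] :
--             pass
--         else:
--             if server_needed[i] < server_needed[i+2] :
--
--                 under_provision=under_provision+1
--             else:
--                 if server_needed[i] > server_needed[i+2] :
--                     over_provision=over_provision+1
--     return under_provision, over_provision
-- ===== SOURCE B (Python) =====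
-- def sla_violation_threshold(server_needed):
--     # Indices i and i+2 share parity, so the two-apart comparisons are exactly
--     # the adjacent comparisons inside each parity slice.  Build the two slices,
--     # count each slice's adjacent increases/decreases in staged passes, and sum.
--     def counts(sub):
--         pairs = list(zip(sub, sub[1:]))
--         under = sum(1 for a, b in pairs if a < b)
--         over = sum(1 for a, b in pairs if a > b)
--         return under, over
--
--     ue, oe = counts(server_needed[::2])
--     uo, oo = counts(server_needed[1::2])
--     return ue + uo, oe + oo
-- ===== Notes on version B (the rewrite author's own statement) =====
-- stated objective: alternative
-- what changed: Instead of one indexed loop comparing server_needed[i] with server_needed[i+2], B splits the list into the two parity slices s[::2] and s[1::2], counts each slice's adjacent increases and decreases in separate staged passes, and sums the two slices' counts; correct because indices two apart always share parity.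
import Mathlib
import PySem

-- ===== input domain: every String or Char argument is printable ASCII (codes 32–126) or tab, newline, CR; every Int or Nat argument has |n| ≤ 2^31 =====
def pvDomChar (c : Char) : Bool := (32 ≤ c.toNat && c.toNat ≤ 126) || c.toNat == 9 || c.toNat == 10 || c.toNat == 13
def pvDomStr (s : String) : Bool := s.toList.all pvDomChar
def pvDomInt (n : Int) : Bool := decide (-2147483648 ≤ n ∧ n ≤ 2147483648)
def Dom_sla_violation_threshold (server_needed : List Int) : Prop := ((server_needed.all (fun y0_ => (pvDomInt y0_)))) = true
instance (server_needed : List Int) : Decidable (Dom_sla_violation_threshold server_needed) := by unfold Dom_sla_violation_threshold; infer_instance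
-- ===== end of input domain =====

-- B replaces A's indexed two-apart loop by splitting the list into the two
-- parity slices s[::2] and s[1::2] and summing each slice's adjacent
-- increase/decrease counts (staged passes); same O(n) cost, different structure.

-- ===== PORT A =====
-- for i in range(len(s)-2): compare s[i] with s[i+2] (indices always in range: pyGetD)
def sla_violation_threshold (server_needed : List Int) : Int × Int :=
  (PySem.List.pyRange 0 ((server_needed.length : Int) - 2) 1).foldl
    (fun acc i =>
      if PySem.List.pyGetD server_needed i 0 = PySem.List.pyGetD server_needed (i + 2) 0 then acc
      else if PySem.List.pyGetD server_needed i 0 < PySem.List.pyGetD server_needed (i + 2) 0 then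
        (acc.1 + 1, acc.2)
      else if PySem.List.pyGetD server_needed i 0 > PySem.List.pyGetD server_needed (i + 2) 0 then
        (acc.1, acc.2 + 1)
      else acc)
    (0, 0)

-- ===== PORT B =====
-- counts(sub): pairs = zip(sub, sub[1:]); under/over = the two 0/1 comprehension sums
-- (a sum of 1-per-matching-pair is List.countP, per the PySem convention)
def sla_counts (sub : List Int) : Int × Int :=
  let pairs := sub.zip (PySem.List.slice sub (some 1) none)
  (((pairs.countP (fun p => p.1 < p.2) : Nat) : Int),
   ((pairs.countP (fun p => p.1 > p.2) : Nat) : Int))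

-- s[::2] and s[1::2]; step 2 ≠ 0, so slice? is always `some` and getD's default is unreachable
def sla_violation_threshold_alt (server_needed : List Int) : Int × Int :=
  let evens := (PySem.List.slice? server_needed none none 2).getD []
  let odds := (PySem.List.slice? server_needed (some 1) none 2).getD []
  let c1 := sla_counts evens
  let c2 := sla_counts odds
  (c1.1 + c2.1, c1.2 + c2.2)

-- ===== PRECONDITION & SPEC =====
def Spec_sla_violation_threshold (server_needed : List Int) (out : Int × Int) : Prop := out = sla_violation_threshold_alt server_needed
instance (server_needed : List Int) (out : Int × Int) : Decidable (Spec_sla_violation_threshold server_needed out) := by unfold Spec_sla_violation_threshold; infer_instance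

-- ===== CLAIM (what is proved, stated in full; the proofs are below) =====
def Claim_equal_sla_violation_threshold : Prop := ∀ (server_needed : List Int), Dom_sla_violation_threshold server_needed → Spec_sla_violation_threshold server_needed (sla_violation_threshold server_needed)

-- ===== LEMMAS AND PROOFS =====

-- one comparison's contribution
def stepP (a b : Int) : Int × Int := ((if a < b then 1 else 0), (if a > b then 1 else 0))

def stepO : Option Int → Option Int → Int × Int
  | some p, some x => stepP p x
  | _, _ => (0, 0)

-- reference count: each element compared with the one two places later
def cnt : List Int → Int × Int
  | x :: t => stepO (some x) t[1]? + cnt t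
  | [] => (0, 0)

-- adjacent-pair count: each element compared with its successor
def cnt1 : List Int → Int × Int
  | x :: t => stepO (some x) t[0]? + cnt1 t
  | [] => (0, 0)

-- every other element, starting at the head (value of the step-2 slice)
def every2 : List Int → List Int
  | [] => []
  | [x] => [x]
  | x :: _ :: t => x :: every2 t

theorem every2_cons (x : Int) (t : List Int) : every2 (x :: t) = x :: every2 t.tail := by
  cases t <;> rfl

theorem every2_head (t : List Int) : (every2 t)[0]? = t[0]? := by
  match t with
  | [] => rfl
  | [a] => rfl
  | a :: b :: u => rfl

theorem fm_every2 (xs : List Int) :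
    List.filterMap (fun k => xs[2 * k]?) (List.range ((xs.length + 1) / 2)) = every2 xs := by
  match xs with
  | [] => rfl
  | [x] => simp [List.range_one, every2]
  | x :: y :: t =>
    have hc : ((x :: y :: t).length + 1) / 2 = (t.length + 1) / 2 + 1 := by
      simp only [List.length_cons]; omega
    rw [hc, List.range_succ_eq_map, List.filterMap_cons, List.filterMap_map]
    have hf : ((fun k => (x :: y :: t)[2 * k]?) ∘ Nat.succ) = fun k => t[2 * k]? := by
      funext k
      have h2 : 2 * Nat.succ k = 2 * k + 1 + 1 := by omega
      simp [Function.comp, h2]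
    simp only [Nat.mul_zero, List.getElem?_cons_zero, hf, fm_every2 t, every2]

theorem slice2_all (xs : List Int) :
    PySem.List.slice? xs none none 2 = some (every2 xs) := by
  simp only [PySem.List.slice?, PySem.List.sliceIndices]
  norm_num
  have hcount : (if 0 < xs.length then (((xs.length : Int) + 2 - 1) / 2).toNat else 0)
      = (xs.length + 1) / 2 := by
    split_ifs with h <;> omega
  rw [hcount]
  have hfun : (fun k : Nat => xs[(2 * (k : Int)).toNat]?) = fun k : Nat => xs[2 * k]? := by
    funext k
    congr 1
  rw [hfun, fm_every2]

theorem slice2_odd (xs : List Int) :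
    PySem.List.slice? xs (some 1) none 2 = some (every2 xs.tail) := by
  simp only [PySem.List.slice?, PySem.List.sliceIndices]
  norm_num
  match xs with
  | [] => rfl
  | x :: t =>
    have hstart : min (1 : Int) ((x :: t).length : Int) = 1 := by
      simp only [List.length_cons]; omega
    rw [hstart]
    have hcount : (if 1 < (x :: t).length then ((((x :: t).length : Int) - 1 + 2 - 1) / 2).toNat else 0)
        = (t.length + 1) / 2 := by
      simp only [List.length_cons]; split_ifs with h <;> omega
    rw [hcount]
    have hfun : (fun k : Nat => (x :: t)[((1:Int) + 2 * (k : Int)).toNat]?) = fun k : Nat => t[2 * k]? := by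
      funext k
      have : ((1:Int) + 2 * (k : Int)).toNat = 2 * k + 1 := by omega
      simp [this]
    rw [hfun, fm_every2]
    rfl

-- B's counts(sub) is the adjacent-pair count
theorem sla_counts_eq (sub : List Int) : sla_counts sub = cnt1 sub := by
  induction sub with
  | nil => rfl
  | cons x t ih =>
    match t with
    | [] => rfl
    | y :: u =>
      have key : cnt1 (x :: y :: u) = stepP x y + cnt1 (y :: u) := by
        simp [cnt1, stepO]
      have hz : (x :: y :: u).zip (PySem.List.slice (x :: y :: u) (some 1) none)
          = (x, y) :: (y :: u).zip (PySem.List.slice (y :: u) (some 1) none) := by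
        rw [PySem.List.slice_from_one, PySem.List.slice_from_one]
        rfl
      rw [key, ← ih]
      simp only [sla_counts, hz, List.countP_cons, stepP, Prod.ext_iff, Prod.fst_add, Prod.snd_add]
      constructor <;> push_cast <;> split_ifs <;> simp_all <;> omega

-- the two-apart count splits into the two parity slices' adjacent counts
theorem cnt_split (s : List Int) : cnt s = cnt1 (every2 s) + cnt1 (every2 s.tail) := by
  induction s with
  | nil => rfl
  | cons x t ih =>
    rw [show (x :: t).tail = t from rfl, every2_cons]
    show stepO (some x) t[1]? + cnt t = cnt1 (x :: every2 t.tail) + cnt1 (every2 t)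
    have h1 : t[1]? = (every2 t.tail)[0]? := by
      rw [every2_head]
      cases t <;> rfl
    rw [ih, h1]
    show _ = stepO (some x) ((every2 t.tail)[0]?) + cnt1 (every2 t.tail) + cnt1 (every2 t)
    abel

theorem alt_eq_cnt (s : List Int) : sla_violation_threshold_alt s = cnt s := by
  unfold sla_violation_threshold_alt
  rw [slice2_all, slice2_odd]
  simp only [Option.getD_some, sla_counts_eq, cnt_split]
  rfl

-- A's fold is an additive accumulation
theorem A_fold_fun (s : List Int) :
    (fun (acc : Int × Int) (i : Int) =>
      if PySem.List.pyGetD s i 0 = PySem.List.pyGetD s (i + 2) 0 then acc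
      else if PySem.List.pyGetD s i 0 < PySem.List.pyGetD s (i + 2) 0 then (acc.1 + 1, acc.2)
      else if PySem.List.pyGetD s i 0 > PySem.List.pyGetD s (i + 2) 0 then (acc.1, acc.2 + 1)
      else acc)
    = (fun acc i => acc + stepP (PySem.List.pyGetD s i 0) (PySem.List.pyGetD s (i + 2) 0)) := by
  funext acc i
  set a := PySem.List.pyGetD s i 0
  set b := PySem.List.pyGetD s (i + 2) 0
  rcases lt_trichotomy a b with h | h | h
  · simp [stepP, h, h.ne, h.asymm, Prod.ext_iff]
  · simp [stepP, h, Prod.ext_iff]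
  · simp [stepP, h, h.ne', h.asymm, Prod.ext_iff]

theorem foldl_add_pair (l : List Int) (g : Int → Int × Int) :
    ∀ (init : Int × Int), l.foldl (fun acc i => acc + g i) init = init + (l.map g).sum := by
  induction l with
  | nil => intro init; simp
  | cons x t ih => intro init; simp [List.foldl_cons, ih, add_assoc]

-- the indexed pair list IS zip s (s.drop 2)
theorem range_pairs_eq_zip (s : List Int) :
    (List.range (s.length - 2)).map
        (fun k => stepP (s.getD k 0) (s.getD (k + 2) 0))
      = (s.zip (s.drop 2)).map (fun p => stepP p.1 p.2) := by
  apply List.ext_getElem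
  · simp only [List.length_map, List.length_range, List.length_zip, List.length_drop]; omega
  · intro i h1 h2
    simp only [List.getElem_map, List.getElem_range, List.getElem_zip]
    have hlen : i < s.length - 2 := by simpa using h1
    have hi : i < s.length := by omega
    have hi2 : i + 2 < s.length := by omega
    rw [List.getD_eq_getElem s 0 hi, List.getD_eq_getElem s 0 hi2, List.getElem_drop]
    congr 1
    simp [Nat.add_comm]

theorem sum_zip_eq_cnt (s : List Int) :
    ((s.zip (s.drop 2)).map (fun p => stepP p.1 p.2)).sum = cnt s := by
  induction s with
  | nil => rfl
  | cons x t ih =>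
    match t with
    | [] => rfl
    | [y] => rfl
    | y :: z :: t' =>
      show ((stepP x z) :: ((y :: z :: t').zip t').map (fun p => stepP p.1 p.2)).sum = _
      have : (y :: z :: t').zip t' = (y :: z :: t').zip ((y :: z :: t').drop 2) := rfl
      rw [List.sum_cons, this, ih]
      rfl

theorem a_eq_cnt (s : List Int) : sla_violation_threshold s = cnt s := by
  unfold sla_violation_threshold
  rw [A_fold_fun, foldl_add_pair, PySem.List.pyRange_one]
  have htn : (((s.length : Int) - 2 - 0)).toNat = s.length - 2 := by omega
  rw [List.map_map, htn]
  have hm : (List.range (s.length - 2)).map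
      ((fun i => stepP (PySem.List.pyGetD s i 0) (PySem.List.pyGetD s (i + 2) 0)) ∘ fun k : Nat => (0 : Int) + (k : Int))
      = (List.range (s.length - 2)).map (fun k => stepP (s.getD k 0) (s.getD (k + 2) 0)) := by
    apply List.map_congr_left
    intro k hk
    simp only [Function.comp, zero_add]
    have : (k : Int) + 2 = ((k + 2 : Nat) : Int) := by push_cast; ring
    rw [this, PySem.List.pyGetD_natCast, PySem.List.pyGetD_natCast]
  rw [hm, range_pairs_eq_zip, sum_zip_eq_cnt]
  simp [Prod.mk_zero_zero]

-- ===== VERDICT (by name: the statement is the Claim_ definition above) =====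
theorem sla_violation_threshold_spec : Claim_equal_sla_violation_threshold := by
  intro s _
  unfold Spec_sla_violation_threshold
  rw [a_eq_cnt, alt_eq_cnt]
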